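-- pv_equiv track=rewrite | github.com/junsoopooh/Studying_Algorithm | 3기/week07/junsu/2.py | solution
-- ===== SOURCE A (Python) =====
-- def search_index(arr,k):
--     result = -1
--     if k in arr:
--         result = arr.index(k)
--     return result
--
-- def solution(babbling):
--     answer = 0
--     arr = ["aya", "ye", "woo", "ma"]
--     for word in babbling:
--         idx = 0
--         n = len(word)
--         last_find_idx = -1
--         while idx <= n:
--             if not n:
--                 answer += 1
--                 break
--             tmp = word[:idx+1]
--             search_result = search_index(arr,tmp)
--             if search_result != -1 and search_result != last_find_idx:
--                 last_find_idx = search_index(arr,tmp)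
--                 word = word[idx+1:]
--                 n = len(word)
--                 idx = 0
--             else:
--                 idx += 1
--
--     return answer
-- ===== SOURCE B (Python) =====
-- SOUNDS = ("aya", "ye", "woo", "ma")
--
-- def _pronounceable(word):
--     prev = None
--     i = 0
--     n = len(word)
--     while i < n:
--         for s in SOUNDS:
--             if s != prev and word.startswith(s, i):
--                 prev = s
--                 i += len(s)
--                 break
--         else:
--             return False
--     return True
--
-- def solution(babbling):
--     return sum(1 for word in babbling if _pronounceable(word))
-- ===== Notes on version B (the rewrite author's own statement) =====
-- stated objective: alternative
-- what changed: A repeatedly grows a prefix slice, looks it up with 'in'+'.index' over the sound table, and restarts the scan with a fresh slice of the word after every consumed sound; B does one left-to-right greedy pass per word, trying the four sounds at the current index with startswith and tracking the previous sound.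
import Mathlib
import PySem

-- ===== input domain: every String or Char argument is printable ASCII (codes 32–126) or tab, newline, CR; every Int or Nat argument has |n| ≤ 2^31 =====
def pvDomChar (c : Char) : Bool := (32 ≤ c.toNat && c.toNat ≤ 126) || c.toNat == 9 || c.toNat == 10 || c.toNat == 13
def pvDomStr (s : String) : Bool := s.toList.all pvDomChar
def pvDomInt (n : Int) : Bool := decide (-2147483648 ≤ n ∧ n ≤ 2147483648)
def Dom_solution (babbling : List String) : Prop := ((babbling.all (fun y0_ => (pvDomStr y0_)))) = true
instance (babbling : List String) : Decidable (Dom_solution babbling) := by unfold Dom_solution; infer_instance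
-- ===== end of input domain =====

-- B replaces A's rescanning (restart prefix growth after every consumed sound, rescanning
-- the four-sound table for every prefix length) by a single left-to-right greedy scan that
-- tries the four sounds at the current position, remembering the previous sound (objective:
-- alternative algorithm; fewer passes per word, not measured faster on the generated inputs).

-- ===== PORT A =====
def arrA : List String := ["aya", "ye", "woo", "ma"]

-- result = -1; if k in arr: result = arr.index(k); return result
def search_index (arr : List String) (k : String) : Int :=
  if arr.contains k then
    match PySem.List.index? arr k with
    | some i => (i : Int)
    | none => -1
  else -1

-- A's inner while-loop for one word; returns the word's contribution to `answer`
-- (1 exactly when the loop reaches `answer += 1; break`).  idx is a Nat: in A it starts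
-- at 0 and only grows or resets to 0, so word[:idx+1] / word[idx+1:] are List.take / List.drop
-- (exact: the index is never negative).
def loopA (word : List Char) (idx : Nat) (last : Int) : Int :=
  if idx ≤ word.length then
    if word.length = 0 then 1
    else
      let tmp := String.ofList (word.take (idx+1))
      let r := search_index arrA tmp
      if r ≠ -1 ∧ r ≠ last then
        loopA (word.drop (idx+1)) 0 (search_index arrA tmp)
      else
        loopA word (idx+1) last
  else 0
  termination_by (word.length, word.length + 1 - idx)
  decreasing_by
  · left; simp [List.length_drop]; omega
  · right; omega

def solution (babbling : List String) : Int :=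
  babbling.foldl (fun answer word => answer + loopA word.toList 0 (-1)) 0

-- ===== PORT B =====
def soundsB : List String := ["aya", "ye", "woo", "ma"]

-- the while-loop of B's _pronounceable: i scans the word left to right; the for/else over
-- SOUNDS is List.find?; word.startswith(s, i) is s.toList.isPrefixOf (word.drop i)
-- (exact: i is never negative here).
def loopB (word : List Char) (i : Nat) (prev : Option String) : Bool :=
  if i < word.length then
    match h : soundsB.find? (fun s => (some s != prev) && s.toList.isPrefixOf (word.drop i)) with
    | some s => loopB word (i + s.length) (some s)
    | none => false
  else true
  termination_by word.length - i
  decreasing_by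
    have hm := List.mem_of_find?_eq_some h
    have hs : 1 ≤ s.length := by fin_cases hm <;> decide
    omega

def pronounceable (word : String) : Bool := loopB word.toList 0 none

def solution_alt (babbling : List String) : Int :=
  babbling.foldl (fun acc word => if pronounceable word then acc + 1 else acc) 0

-- ===== PRECONDITION & SPEC =====
def Spec_solution (babbling : List String) (out : Int) : Prop := out = solution_alt babbling
instance (babbling : List String) (out : Int) : Decidable (Spec_solution babbling out) := by unfold Spec_solution; infer_instance

-- ===== CLAIM (what is proved, stated in full; the proofs are below) =====
def Claim_equal_solution : Prop := ∀ (babbling : List String), Dom_solution babbling → Spec_solution babbling (solution babbling)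

-- ===== LEMMAS AND PROOFS =====

theorem ofList_eq_iff (l : List Char) (s : String) : String.ofList l = s ↔ l = s.toList := by
  constructor
  · intro h; have := congrArg String.toList h; simpa using this
  · intro h; subst h; simp

theorem si_eq (l : List Char) : search_index arrA (String.ofList l) =
    if l = ['a','y','a'] then 0 else if l = ['y','e'] then 1
    else if l = ['w','o','o'] then 2 else if l = ['m','a'] then 3 else -1 := by
  by_cases h1 : l = ['a','y','a']
  · subst h1; decide
  by_cases h2 : l = ['y','e']
  · subst h2; decide
  by_cases h3 : l = ['w','o','o']
  · subst h3; decide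
  by_cases h4 : l = ['m','a']
  · subst h4; decide
  simp only [if_neg h1, if_neg h2, if_neg h3, if_neg h4]
  have hm : String.ofList l ∉ arrA := by
    simp [arrA, ofList_eq_iff]
    exact ⟨h1, h2, h3, h4⟩
  simp [search_index, List.contains_eq_mem, hm]

theorem si_long (l : List Char) (h : 4 ≤ l.length) : search_index arrA (String.ofList l) = -1 := by
  rw [si_eq]
  split_ifs with a b c d <;> first | rfl | (subst_vars; simp at h)

theorem scanDead (w : List Char) (last : Int) (idx : Nat) (h3 : 2 ≤ idx)
    (f2 : search_index arrA (String.ofList (w.take 2)) = -1 ∨ search_index arrA (String.ofList (w.take 2)) = last)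
    (f3 : search_index arrA (String.ofList (w.take 3)) = -1 ∨ search_index arrA (String.ofList (w.take 3)) = last) :
    loopA w idx last = 0 := by
  rw [loopA]
  by_cases hle : idx ≤ w.length
  · have hw : ¬ w.length = 0 := by omega
    rw [if_pos hle, if_neg hw]
    have hfail : ¬(search_index arrA (String.ofList (w.take (idx+1))) ≠ -1
        ∧ search_index arrA (String.ofList (w.take (idx+1))) ≠ last) := by
      by_cases hidx2 : idx = 2
      · subst hidx2
        rcases f3 with h | h <;> simp [h]
      · by_cases hlen : w.length ≤ 3
        · have hidx : idx = 3 := by omega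
          have hw3 : w.take (idx+1) = w.take 3 := by
            subst hidx
            rw [List.take_of_length_le (by omega), List.take_of_length_le hlen]
          rw [hw3]
          rcases f3 with h | h <;> simp [h]
        · have h4 : 4 ≤ (w.take (idx+1)).length := by
            simp [List.length_take]; omega
          simp [si_long _ h4]
    simp only [if_neg hfail]
    exact scanDead w last (idx+1) (by omega) f2 f3
  · rw [if_neg hle]
  termination_by w.length + 1 - idx
  decreasing_by omega

theorem loopB_shift (w : List Char) (i : Nat) (prev : Option String) :
    loopB w i prev = loopB (w.drop i) 0 prev := by
  rw [loopB]; conv_rhs => rw [loopB]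
  simp only [List.drop_zero, List.length_drop]
  by_cases h : i < w.length
  · rw [if_pos h, if_pos (by omega)]
    rcases hfind : soundsB.find? (fun s => (some s != prev) && s.toList.isPrefixOf (w.drop i)) with _ | s
    · split
      · rename_i s' heq; cases heq
      · rfl
    · have hm := List.mem_of_find?_eq_some hfind
      have hs : 1 ≤ s.length := by fin_cases hm <;> decide
      split
      · rename_i s' heq; cases heq
        rw [loopB_shift w (i + s.length), loopB_shift (w.drop i) (0 + s.length)]
        simp only [List.drop_drop]
        congr 2
        omega
      · rename_i heq; cases heq
  · rw [if_neg h, if_neg (by omega)]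
  termination_by w.length - i
  decreasing_by
  · omega
  · simp only [List.length_drop, Nat.zero_add]; omega

theorem loopB_eval_none (w : List Char) (prev : Option String) (h0 : 0 < w.length)
    (hfind : soundsB.find? (fun s => (some s != prev) && s.toList.isPrefixOf w) = none) :
    loopB w 0 prev = false := by
  rw [loopB, if_pos h0]
  simp only [List.drop_zero]
  rw [hfind]

theorem loopB_eval_some (w : List Char) (prev : Option String) (s : String) (h0 : 0 < w.length)
    (hfind : soundsB.find? (fun s => (some s != prev) && s.toList.isPrefixOf w) = some s) :
    loopB w 0 prev = loopB (w.drop s.length) 0 (some s) := by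
  rw [loopB, if_pos h0]
  simp only [List.drop_zero]
  rw [hfind]
  show loopB w (0 + s.length) (some s) = loopB (w.drop s.length) 0 (some s)
  rw [Nat.zero_add, loopB_shift]

-- correspondence between A's `last_find_idx` and B's `prev`
def RelAB (last : Int) (prev : Option String) : Prop :=
  (last = -1 ∧ prev = none) ∨ (last = 0 ∧ prev = some "aya") ∨ (last = 1 ∧ prev = some "ye")
    ∨ (last = 2 ∧ prev = some "woo") ∨ (last = 3 ∧ prev = some "ma")

-- search_index of a length-1 prefix never matches
theorem si_one (c : Char) : search_index arrA (String.ofList [c]) = -1 := by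
  rw [si_eq]; simp

theorem take2_ne (w l : List Char) (hl : 3 ≤ l.length) : w.take 2 ≠ l := by
  intro h; have := congrArg List.length h; simp [List.length_take] at this; omega

theorem take32 (w l : List Char) (h : w.take 3 = l) (hl : l.length = 2) : w.take 2 = l := by
  have hlen : w.length = 2 := by
    have := congrArg List.length h; simp [List.length_take] at this; omega
  rw [List.take_of_length_le (by omega)] at h ⊢
  exact h

theorem take_2_of_3 (w l : List Char) (h : w.take 3 = l) : w.take 2 = l.take 2 := by
  rw [← h, List.take_take]; norm_num

theorem pfx_iff (l w : List Char) : (l.isPrefixOf w = true) ↔ w.take l.length = l := by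
  rw [List.isPrefixOf_iff_prefix, List.prefix_iff_eq_take]; exact eq_comm

theorem pfx_false (l w : List Char) (h : w.take l.length ≠ l) : l.isPrefixOf w = false := by
  rw [Bool.eq_false_iff, Ne, pfx_iff]; exact h

theorem pfx_true (l w : List Char) (h : w.take l.length = l) : l.isPrefixOf w = true :=
  (pfx_iff l w).mpr h

theorem loopA_step (w : List Char) (idx : Nat) (last : Int) (hidx : idx ≤ w.length)
    (hw : ¬ w.length = 0)
    (hfail : search_index arrA (String.ofList (w.take (idx+1))) = -1
      ∨ search_index arrA (String.ofList (w.take (idx+1))) = last) :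
    loopA w idx last = loopA w (idx+1) last := by
  rw [loopA, if_pos hidx, if_neg hw]
  have hne : ¬(search_index arrA (String.ofList (w.take (idx+1))) ≠ -1
      ∧ search_index arrA (String.ofList (w.take (idx+1))) ≠ last) := by tauto
  rw [if_neg hne]

theorem loopA_hit (w : List Char) (idx : Nat) (last r : Int) (hidx : idx ≤ w.length)
    (hw : ¬ w.length = 0)
    (hr : search_index arrA (String.ofList (w.take (idx+1))) = r)
    (h1 : r ≠ -1) (h2 : r ≠ last) :
    loopA w idx last = loopA (w.drop (idx+1)) 0 r := by
  rw [loopA, if_pos hidx, if_neg hw,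
    if_pos ⟨by rw [hr]; exact h1, by rw [hr]; exact h2⟩, hr]

theorem main_per_word : ∀ (n : Nat) (w : List Char) (last : Int) (prev : Option String),
    w.length ≤ n → RelAB last prev →
    loopA w 0 last = (if loopB w 0 prev then 1 else 0) := by
  intro n
  induction n with
  | zero =>
    intro w last prev hn _
    have hw : w = [] := by cases w with | nil => rfl | cons a l => simp at hn
    subst hw; simp [loopA, loopB]
  | succ n ih =>
    intro w last prev hn hrel
    cases w with
    | nil => simp [loopA, loopB]
    | cons c cs =>
      have hw : ¬ (c :: cs).length = 0 := by simp
      have h0 : 0 < (c :: cs).length := by simp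
      have step0 : loopA (c :: cs) 0 last = loopA (c :: cs) 1 last :=
        loopA_step _ 0 last (by simp) hw (Or.inl (si_one c))
      have e2aya : (c :: cs).take 2 ≠ ['a','y','a'] := take2_ne _ _ (by decide)
      have e2woo : (c :: cs).take 2 ≠ ['w','o','o'] := take2_ne _ _ (by decide)
      by_cases b2y : (c :: cs).take 2 = ['y','e']
      · -- "ye" is the (unique) sound prefix
        have hlen2 : 2 ≤ (c :: cs).length := by
          have := congrArg List.length b2y; simp [List.length_take] at this; simp only [List.length_cons]; omega
        have hr2 : search_index arrA (String.ofList ((c :: cs).take 2)) = 1 := by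
          rw [si_eq, if_neg e2aya, if_pos b2y]
        have hn3a : (c :: cs).take 3 ≠ ['a','y','a'] := by
          intro h; have := take_2_of_3 _ _ h; rw [b2y] at this; exact absurd this (by decide)
        have hn3w : (c :: cs).take 3 ≠ ['w','o','o'] := by
          intro h; have := take_2_of_3 _ _ h; rw [b2y] at this; exact absurd this (by decide)
        have hn3m : (c :: cs).take 3 ≠ ['m','a'] := by
          intro h; have := take32 _ _ h (by decide); rw [b2y] at this; exact absurd this (by decide)
        have pA : ("aya".toList.isPrefixOf (c :: cs)) = false := pfx_false _ _ hn3a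
        have pY : ("ye".toList.isPrefixOf (c :: cs)) = true := pfx_true _ _ b2y
        by_cases hlast : last = (1 : Int)
        · -- blocked: previous sound was "ye"
          have hprev : prev = some "ye" := by
            rcases hrel with ⟨h,rfl⟩|⟨h,rfl⟩|⟨h,rfl⟩|⟨h,rfl⟩|⟨h,rfl⟩ <;> simp_all
          have f2 : search_index arrA (String.ofList ((c :: cs).take 2)) = -1
              ∨ search_index arrA (String.ofList ((c :: cs).take 2)) = last := by
            right; rw [hr2, hlast]
          have f3 : search_index arrA (String.ofList ((c :: cs).take 3)) = -1
              ∨ search_index arrA (String.ofList ((c :: cs).take 3)) = last := by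
            by_cases h3y : (c :: cs).take 3 = ['y','e']
            · right; rw [si_eq, if_neg hn3a, if_pos h3y, hlast]
            · left; rw [si_eq, if_neg hn3a, if_neg h3y, if_neg hn3w, if_neg hn3m]
          have pW : ("woo".toList.isPrefixOf (c :: cs)) = false := pfx_false _ _ hn3w
          have pM : ("ma".toList.isPrefixOf (c :: cs)) = false := pfx_false _ _ (by
            intro h
            have h' : (c :: cs).take 2 = ['m','a'] := h
            rw [b2y] at h'; exact absurd h' (by decide))
          have hfind : soundsB.find?
              (fun s => (some s != prev) && s.toList.isPrefixOf (c :: cs)) = none := by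
            subst hprev
            rw [soundsB, List.find?_cons_of_neg (by rw [pA, Bool.and_false]; simp),
              List.find?_cons_of_neg (by simp),
              List.find?_cons_of_neg (by rw [pW, Bool.and_false]; simp),
              List.find?_cons_of_neg (by rw [pM, Bool.and_false]; simp), List.find?_nil]
          rw [loopB_eval_none _ _ h0 hfind, step0,
            loopA_step _ 1 last (by omega) hw f2,
            (scanDead (c :: cs) last (1+1) (by omega) f2 f3)]
          simp
        · -- hit: consume "ye"
          have hprev : prev ≠ some "ye" := by
            rcases hrel with ⟨h,rfl⟩|⟨h,rfl⟩|⟨h,rfl⟩|⟨h,rfl⟩|⟨h,rfl⟩ <;> simp_all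
          have hfind : soundsB.find?
              (fun s => (some s != prev) && s.toList.isPrefixOf (c :: cs)) = some "ye" := by
            rw [soundsB, List.find?_cons_of_neg (by rw [pA, Bool.and_false]; simp),
              List.find?_cons_of_pos (by
                rw [pY, Bool.and_true, bne_iff_ne]; exact Ne.symm hprev)]
          rw [loopB_eval_some _ _ _ h0 hfind, step0,
            loopA_hit _ 1 last 1 (by omega) hw hr2 (by decide) (Ne.symm hlast)]
          rw [show "ye".length = 2 from rfl]
          exact ih _ 1 (some "ye")
            (by simp only [List.length_drop, List.length_cons] at hn ⊢; omega)
            (Or.inr (Or.inr (Or.inl ⟨rfl, rfl⟩)))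
      by_cases b2m : (c :: cs).take 2 = ['m','a']
      · -- "ma" is the (unique) sound prefix
        have hlen2 : 2 ≤ (c :: cs).length := by
          have := congrArg List.length b2m; simp [List.length_take] at this; simp only [List.length_cons]; omega
        have hr2 : search_index arrA (String.ofList ((c :: cs).take 2)) = 3 := by
          rw [si_eq, if_neg e2aya, if_neg b2y, if_neg e2woo, if_pos b2m]
        have hn3a : (c :: cs).take 3 ≠ ['a','y','a'] := by
          intro h; have := take_2_of_3 _ _ h; rw [b2m] at this; exact absurd this (by decide)
        have hn3w : (c :: cs).take 3 ≠ ['w','o','o'] := by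
          intro h; have := take_2_of_3 _ _ h; rw [b2m] at this; exact absurd this (by decide)
        have hn3y : (c :: cs).take 3 ≠ ['y','e'] := by
          intro h; have := take32 _ _ h (by decide); rw [b2m] at this; exact absurd this (by decide)
        have pA : ("aya".toList.isPrefixOf (c :: cs)) = false := pfx_false _ _ hn3a
        have pY : ("ye".toList.isPrefixOf (c :: cs)) = false := pfx_false _ _ (by
          intro h
          have h' : (c :: cs).take 2 = ['y','e'] := h
          exact b2y h')
        have pW : ("woo".toList.isPrefixOf (c :: cs)) = false := pfx_false _ _ hn3w
        have pM : ("ma".toList.isPrefixOf (c :: cs)) = true := pfx_true _ _ b2m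
        by_cases hlast : last = (3 : Int)
        · -- blocked: previous sound was "ma"
          have hprev : prev = some "ma" := by
            rcases hrel with ⟨h,rfl⟩|⟨h,rfl⟩|⟨h,rfl⟩|⟨h,rfl⟩|⟨h,rfl⟩ <;> simp_all
          have f2 : search_index arrA (String.ofList ((c :: cs).take 2)) = -1
              ∨ search_index arrA (String.ofList ((c :: cs).take 2)) = last := by
            right; rw [hr2, hlast]
          have f3 : search_index arrA (String.ofList ((c :: cs).take 3)) = -1
              ∨ search_index arrA (String.ofList ((c :: cs).take 3)) = last := by
            by_cases h3m : (c :: cs).take 3 = ['m','a']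
            · right; rw [si_eq, if_neg hn3a, if_neg hn3y, if_neg hn3w, if_pos h3m, hlast]
            · left; rw [si_eq, if_neg hn3a, if_neg hn3y, if_neg hn3w, if_neg h3m]
          have hfind : soundsB.find?
              (fun s => (some s != prev) && s.toList.isPrefixOf (c :: cs)) = none := by
            subst hprev
            rw [soundsB, List.find?_cons_of_neg (by rw [pA, Bool.and_false]; simp),
              List.find?_cons_of_neg (by rw [pY, Bool.and_false]; simp),
              List.find?_cons_of_neg (by rw [pW, Bool.and_false]; simp),
              List.find?_cons_of_neg (by simp), List.find?_nil]
          rw [loopB_eval_none _ _ h0 hfind, step0,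
            loopA_step _ 1 last (by omega) hw f2,
            (scanDead (c :: cs) last (1+1) (by omega) f2 f3)]
          simp
        · -- hit: consume "ma"
          have hprev : prev ≠ some "ma" := by
            rcases hrel with ⟨h,rfl⟩|⟨h,rfl⟩|⟨h,rfl⟩|⟨h,rfl⟩|⟨h,rfl⟩ <;> simp_all
          have hfind : soundsB.find?
              (fun s => (some s != prev) && s.toList.isPrefixOf (c :: cs)) = some "ma" := by
            rw [soundsB, List.find?_cons_of_neg (by rw [pA, Bool.and_false]; simp),
              List.find?_cons_of_neg (by rw [pY, Bool.and_false]; simp),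
              List.find?_cons_of_neg (by rw [pW, Bool.and_false]; simp),
              List.find?_cons_of_pos (by
                rw [pM, Bool.and_true, bne_iff_ne]; exact Ne.symm hprev)]
          rw [loopB_eval_some _ _ _ h0 hfind, step0,
            loopA_hit _ 1 last 3 (by omega) hw hr2 (by decide) (Ne.symm hlast)]
          rw [show "ma".length = 2 from rfl]
          exact ih _ 3 (some "ma")
            (by simp only [List.length_drop, List.length_cons] at hn ⊢; omega)
            (Or.inr (Or.inr (Or.inr (Or.inr ⟨rfl, rfl⟩))))
      -- from here on no 2-char sound is a prefix
      have hr2 : search_index arrA (String.ofList ((c :: cs).take 2)) = -1 := by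
        rw [si_eq, if_neg e2aya, if_neg b2y, if_neg e2woo, if_neg b2m]
      have pY : ("ye".toList.isPrefixOf (c :: cs)) = false := pfx_false _ _ (fun h => b2y h)
      have pM : ("ma".toList.isPrefixOf (c :: cs)) = false := pfx_false _ _ (fun h => b2m h)
      have hn3y : (c :: cs).take 3 ≠ ['y','e'] := fun h => b2y (take32 _ _ h (by decide))
      have hn3m : (c :: cs).take 3 ≠ ['m','a'] := fun h => b2m (take32 _ _ h (by decide))
      by_cases b3a : (c :: cs).take 3 = ['a','y','a']
      · -- "aya" is the (unique) sound prefix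
        have hlen3 : 3 ≤ (c :: cs).length := by
          have := congrArg List.length b3a; simp [List.length_take] at this; simp only [List.length_cons]; omega
        have hr3 : search_index arrA (String.ofList ((c :: cs).take 3)) = 0 := by
          rw [si_eq, if_pos b3a]
        have hn3w : (c :: cs).take 3 ≠ ['w','o','o'] := by rw [b3a]; decide
        have pA : ("aya".toList.isPrefixOf (c :: cs)) = true := pfx_true _ _ b3a
        have pW : ("woo".toList.isPrefixOf (c :: cs)) = false := pfx_false _ _ hn3w
        have step1 : loopA (c :: cs) 1 last = loopA (c :: cs) 2 last :=
          loopA_step _ 1 last (by omega) hw (Or.inl hr2)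
        by_cases hlast : last = (0 : Int)
        · have hprev : prev = some "aya" := by
            rcases hrel with ⟨h,rfl⟩|⟨h,rfl⟩|⟨h,rfl⟩|⟨h,rfl⟩|⟨h,rfl⟩ <;> simp_all
          have f3 : search_index arrA (String.ofList ((c :: cs).take 3)) = -1
              ∨ search_index arrA (String.ofList ((c :: cs).take 3)) = last := by
            right; rw [hr3, hlast]
          have hfind : soundsB.find?
              (fun s => (some s != prev) && s.toList.isPrefixOf (c :: cs)) = none := by
            subst hprev
            rw [soundsB, List.find?_cons_of_neg (by simp),
              List.find?_cons_of_neg (by rw [pY, Bool.and_false]; simp),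
              List.find?_cons_of_neg (by rw [pW, Bool.and_false]; simp),
              List.find?_cons_of_neg (by rw [pM, Bool.and_false]; simp), List.find?_nil]
          rw [loopB_eval_none _ _ h0 hfind, step0, step1,
            (scanDead (c :: cs) last 2 (by omega) (Or.inl hr2) f3)]
          simp
        · have hprev : prev ≠ some "aya" := by
            rcases hrel with ⟨h,rfl⟩|⟨h,rfl⟩|⟨h,rfl⟩|⟨h,rfl⟩|⟨h,rfl⟩ <;> simp_all
          have hfind : soundsB.find?
              (fun s => (some s != prev) && s.toList.isPrefixOf (c :: cs)) = some "aya" := by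
            rw [soundsB, List.find?_cons_of_pos (by
              rw [pA, Bool.and_true, bne_iff_ne]; exact Ne.symm hprev)]
          rw [loopB_eval_some _ _ _ h0 hfind, step0, step1,
            loopA_hit _ 2 last 0 (by omega) hw hr3 (by decide) (Ne.symm hlast)]
          rw [show "aya".length = 3 from rfl]
          exact ih _ 0 (some "aya")
            (by simp only [List.length_drop, List.length_cons] at hn ⊢; omega)
            (Or.inr (Or.inl ⟨rfl, rfl⟩))
      by_cases b3w : (c :: cs).take 3 = ['w','o','o']
      · -- "woo" is the (unique) sound prefix
        have hlen3 : 3 ≤ (c :: cs).length := by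
          have := congrArg List.length b3w; simp [List.length_take] at this; simp only [List.length_cons]; omega
        have hr3 : search_index arrA (String.ofList ((c :: cs).take 3)) = 2 := by
          rw [si_eq, if_neg b3a, if_neg hn3y, if_pos b3w]
        have pA : ("aya".toList.isPrefixOf (c :: cs)) = false := pfx_false _ _ b3a
        have pW : ("woo".toList.isPrefixOf (c :: cs)) = true := pfx_true _ _ b3w
        have step1 : loopA (c :: cs) 1 last = loopA (c :: cs) 2 last :=
          loopA_step _ 1 last (by omega) hw (Or.inl hr2)
        by_cases hlast : last = (2 : Int)
        · have hprev : prev = some "woo" := by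
            rcases hrel with ⟨h,rfl⟩|⟨h,rfl⟩|⟨h,rfl⟩|⟨h,rfl⟩|⟨h,rfl⟩ <;> simp_all
          have f3 : search_index arrA (String.ofList ((c :: cs).take 3)) = -1
              ∨ search_index arrA (String.ofList ((c :: cs).take 3)) = last := by
            right; rw [hr3, hlast]
          have hfind : soundsB.find?
              (fun s => (some s != prev) && s.toList.isPrefixOf (c :: cs)) = none := by
            subst hprev
            rw [soundsB, List.find?_cons_of_neg (by rw [pA, Bool.and_false]; simp),
              List.find?_cons_of_neg (by rw [pY, Bool.and_false]; simp),
              List.find?_cons_of_neg (by simp),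
              List.find?_cons_of_neg (by rw [pM, Bool.and_false]; simp), List.find?_nil]
          rw [loopB_eval_none _ _ h0 hfind, step0, step1,
            (scanDead (c :: cs) last 2 (by omega) (Or.inl hr2) f3)]
          simp
        · have hprev : prev ≠ some "woo" := by
            rcases hrel with ⟨h,rfl⟩|⟨h,rfl⟩|⟨h,rfl⟩|⟨h,rfl⟩|⟨h,rfl⟩ <;> simp_all
          have hfind : soundsB.find?
              (fun s => (some s != prev) && s.toList.isPrefixOf (c :: cs)) = some "woo" := by
            rw [soundsB, List.find?_cons_of_neg (by rw [pA, Bool.and_false]; simp),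
              List.find?_cons_of_neg (by rw [pY, Bool.and_false]; simp),
              List.find?_cons_of_pos (by
                rw [pW, Bool.and_true, bne_iff_ne]; exact Ne.symm hprev)]
          rw [loopB_eval_some _ _ _ h0 hfind, step0, step1,
            loopA_hit _ 2 last 2 (by omega) hw hr3 (by decide) (Ne.symm hlast)]
          rw [show "woo".length = 3 from rfl]
          exact ih _ 2 (some "woo")
            (by simp only [List.length_drop, List.length_cons] at hn ⊢; omega)
            (Or.inr (Or.inr (Or.inr (Or.inl ⟨rfl, rfl⟩))))
      -- no sound is a prefix: the word is not pronounceable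
      have hr3 : search_index arrA (String.ofList ((c :: cs).take 3)) = -1 := by
        rw [si_eq, if_neg b3a, if_neg hn3y, if_neg b3w, if_neg hn3m]
      have pA : ("aya".toList.isPrefixOf (c :: cs)) = false := pfx_false _ _ b3a
      have pW : ("woo".toList.isPrefixOf (c :: cs)) = false := pfx_false _ _ b3w
      have hfind : soundsB.find?
          (fun s => (some s != prev) && s.toList.isPrefixOf (c :: cs)) = none := by
        rw [soundsB, List.find?_cons_of_neg (by rw [pA, Bool.and_false]; simp),
          List.find?_cons_of_neg (by rw [pY, Bool.and_false]; simp),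
          List.find?_cons_of_neg (by rw [pW, Bool.and_false]; simp),
          List.find?_cons_of_neg (by rw [pM, Bool.and_false]; simp), List.find?_nil]
      rw [loopB_eval_none _ _ h0 hfind, step0,
        loopA_step _ 1 last (by simp) hw (Or.inl hr2),
        (scanDead (c :: cs) last (1+1) (by omega) (Or.inl hr2) (Or.inl hr3))]
      simp

-- ===== VERDICT (by name: the statement is the Claim_ definition above) =====
theorem solution_spec : Claim_equal_solution := by
  unfold Claim_equal_solution
  intro bab _
  unfold Spec_solution solution solution_alt
  suffices h : ∀ (bs : List String) (acc : Int),
      bs.foldl (fun answer word => answer + loopA word.toList 0 (-1)) acc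
        = bs.foldl (fun acc word => if pronounceable word then acc + 1 else acc) acc from
    h bab 0
  intro bs
  induction bs with
  | nil => intro acc; rfl
  | cons x xs ih =>
    intro acc
    simp only [List.foldl_cons]
    rw [main_per_word x.toList.length x.toList (-1) none le_rfl (Or.inl ⟨rfl, rfl⟩), ih]
    have hx : acc + (if loopB x.toList 0 none then (1:Int) else 0)
        = if pronounceable x then acc + 1 else acc := by
      unfold pronounceable; split <;> ring
    rw [hx]
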